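-- pv_equiv track=rewrite | github.com/lefoulkrod/computron_9000 | tools/browser/read_content.py | _filter_by_query
-- ===== SOURCE A (Python) =====
-- _READ_BUDGET = 20_000
--
-- _QUERY_CONTEXT_LINES = 1
--
-- def _filter_by_query(
--     content: str, query: str, page_number: int = 1
-- ) -> tuple[str, bool]:
--     """Filter markdown content to lines matching *query* with context.
--
--     Returns a ``(text, truncated)`` tuple.  *text* contains matching lines
--     with ``_QUERY_CONTEXT_LINES`` of surrounding context, grouped by
--     proximity and separated by ``---``.  *page_number* selects which
--     page of results to return (1-indexed).
--     """
--     query_lower = query.lower()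
--     lines = content.split("\n")
--
--     matched_indices: set[int] = set()
--     for i, line in enumerate(lines):
--         if query_lower in line.lower():
--             lo = max(0, i - _QUERY_CONTEXT_LINES)
--             hi = min(len(lines), i + _QUERY_CONTEXT_LINES + 1)
--             matched_indices.update(range(lo, hi))
--
--     if not matched_indices:
--         return "", False
--
--     # Group consecutive line indices
--     sorted_indices = sorted(matched_indices)
--     groups: list[list[int]] = []
--     current: list[int] = [sorted_indices[0]]
--     for idx in sorted_indices[1:]:
--         if idx > current[-1] + 1:
--             groups.append(current)
--             current = [idx]
--         else:
--             current.append(idx)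
--     groups.append(current)
--
--     # Build all group texts
--     group_texts: list[str] = []
--     for group in groups:
--         text = "\n".join(lines[j] for j in group).strip()
--         if text:
--             group_texts.append(text)
--
--     # Paginate groups into pages that fit within the budget
--     header = (
--         f'[Filtered for "{query}" — {len(group_texts)} match(es) '
--         f"from {len(content):,} chars]\n"
--     )
--     header_len = len(header)
--
--     # Walk through groups, assigning them to pages
--     current_page = 1
--     page_parts: list[str] = []
--     page_total = header_len
--     separator_len = 4  # len("\n---\n")
--
--     for text in group_texts:
--         cost = len(text) + separator_len
--         if page_parts and page_total + cost > _READ_BUDGET: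
--             # This group doesn't fit — start a new page
--             if current_page == page_number:
--                 # We've filled the requested page, remaining = truncated
--                 return header + "\n---\n".join(page_parts), True
--             current_page += 1
--             page_parts = []
--             page_total = header_len
--         page_parts.append(text)
--         page_total += cost
--
--     # We've assigned all groups
--     if current_page == page_number:
--         return header + "\n---\n".join(page_parts), False
--     # Requested page is past the end
--     return "", False
-- ===== SOURCE B (Python) =====
-- _READ_BUDGET = 20_000
--
-- _QUERY_CONTEXT_LINES = 1
--
--
-- def _filter_by_query(
--     content: str, query: str, page_number: int = 1
-- ) -> tuple[str, bool]:
--     """Filter markdown content to lines matching *query* with context.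
--
--     Single-pass variant: instead of collecting a set of line indices,
--     sorting and regrouping them, merge the context windows around each
--     match into disjoint [lo, hi) intervals on the fly, then slice.
--     """
--     query_lower = query.lower()
--     lines = content.split("\n")
--     n = len(lines)
--
--     intervals: list[list[int]] = []  # merged, disjoint, in order
--     for i, line in enumerate(lines):
--         if query_lower in line.lower():
--             lo = i - _QUERY_CONTEXT_LINES
--             if lo < 0:
--                 lo = 0
--             hi = i + _QUERY_CONTEXT_LINES + 1
--             if hi > n:
--                 hi = n
--             if intervals and lo <= intervals[-1][1]:
--                 intervals[-1][1] = hi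
--             else:
--                 intervals.append([lo, hi])
--
--     if not intervals:
--         return "", False
--
--     group_texts: list[str] = []
--     for lo, hi in intervals:
--         text = "\n".join(lines[lo:hi]).strip()
--         if text:
--             group_texts.append(text)
--
--     header = (
--         f'[Filtered for "{query}" — {len(group_texts)} match(es) '
--         f"from {len(content):,} chars]\n"
--     )
--     header_len = len(header)
--
--     current_page = 1
--     page_parts: list[str] = []
--     page_total = header_len
--     separator_len = 4  # len("\n---\n")
--
--     for text in group_texts:
--         cost = len(text) + separator_len
--         if page_parts and page_total + cost > _READ_BUDGET:
--             if current_page == page_number: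
--                 return header + "\n---\n".join(page_parts), True
--             current_page += 1
--             page_parts = []
--             page_total = header_len
--         page_parts.append(text)
--         page_total += cost
--
--     if current_page == page_number:
--         return header + "\n---\n".join(page_parts), False
--     return "", False
-- ===== Notes on version B (the rewrite author's own statement) =====
-- stated objective: simpler
-- what changed: Replaces the index-set + sort + consecutive-run regrouping with a single pass that merges the clamped context windows [max(0,i-1), min(n,i+2)) into disjoint intervals on the fly and slices each merged interval directly; the header/pagination loop is unchanged.
import Mathlib
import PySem

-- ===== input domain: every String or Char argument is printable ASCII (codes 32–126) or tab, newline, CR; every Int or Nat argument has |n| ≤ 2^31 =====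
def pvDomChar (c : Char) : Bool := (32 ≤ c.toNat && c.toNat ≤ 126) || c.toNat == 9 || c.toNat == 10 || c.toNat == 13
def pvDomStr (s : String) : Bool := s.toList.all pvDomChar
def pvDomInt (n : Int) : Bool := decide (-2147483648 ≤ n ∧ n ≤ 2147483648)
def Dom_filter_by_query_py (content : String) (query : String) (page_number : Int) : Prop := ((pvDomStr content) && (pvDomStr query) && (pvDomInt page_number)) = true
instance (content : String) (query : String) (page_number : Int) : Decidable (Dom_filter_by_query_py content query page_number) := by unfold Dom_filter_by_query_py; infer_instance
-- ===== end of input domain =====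

-- B replaces A's index-set + sort + consecutive-run regrouping with a single pass that
-- merges the clamped context windows into disjoint intervals and slices them (objective:
-- simpler); the header construction and the pagination loop are the same in both Pythons,
-- so they are shared helpers below.

-- ===== SHARED HELPERS (identical code in both Pythons: the f-string header and the pagination loop) =====

-- "{:,}" formatting of a nonnegative integer: commas every three digits from the right
-- (input: the digit list reversed).
def pvCommaRev : List Char → List Char
  | d1 :: d2 :: d3 :: d4 :: rest => d1 :: d2 :: d3 :: ',' :: pvCommaRev (d4 :: rest)
  | l => l

def pvComma (n : Int) : List Char := (pvCommaRev (PySem.Int.toChars n).reverse).reverse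

-- the f-string header '[Filtered for "{query}" — {k} match(es) from {clen:,} chars]\n'
def pvHeader (query : List Char) (k : Int) (clen : Int) : List Char :=
  "[Filtered for \"".toList ++ query ++ "\" — ".toList ++ PySem.Int.toChars k
    ++ " match(es) from ".toList ++ pvComma clen ++ " chars]\n".toList

-- the pagination loop (identical in A and B): walk the group texts assigning them to
-- pages of at most _READ_BUDGET = 20000 chars; early return ported as a Sum state.
def pvPaginate (header : List Char) (group_texts : List (List Char)) (page_number : Int) :
    String × Bool :=
  let r := group_texts.foldl
    (fun (st : (String × Bool) ⊕ (Int × List (List Char) × Int)) text =>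
      match st with
      | Sum.inl done => Sum.inl done
      | Sum.inr (current_page, page_parts, page_total) =>
        let cost : Int := (text.length : Int) + 4
        if page_parts ≠ [] ∧ page_total + cost > 20000 then
          if current_page = page_number then
            Sum.inl (String.ofList (header ++ PySem.Chars.join ("\n---\n".toList) page_parts), true)
          else
            Sum.inr (current_page + 1, ([] : List (List Char)) ++ [text],
                     (header.length : Int) + cost)
        else
          Sum.inr (current_page, page_parts ++ [text], page_total + cost))
    (Sum.inr (1, ([] : List (List Char)), (header.length : Int)))
  match r with
  | Sum.inl done => done
  | Sum.inr (current_page, page_parts, _) =>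
    if current_page = page_number then
      (String.ofList (header ++ PySem.Chars.join ("\n---\n".toList) page_parts), false)
    else ("", false)

-- ===== PORT A =====
def filter_by_query_py (content : String) (query : String) (page_number : Int) : String × Bool :=
  let query_lower := PySem.Chars.lower query.toList
  let lines := PySem.Chars.splitOn content.toList ['\n']
  let matched : PySem.Set Int :=
    (PySem.List.enumerate lines).foldl
      (fun s p =>
        if PySem.Chars.isIn query_lower (PySem.Chars.lower p.2) then
          PySem.Set.update s
            (PySem.List.pyRange (max 0 (p.1 - 1)) (min (PySem.List.len lines) (p.1 + 2)))
        else s)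
      PySem.Set.empty
  if matched = [] then ("", false)
  else
    let sorted_indices := PySem.List.sorted matched (fun x => x)
    let st := (PySem.List.slice sorted_indices (some 1)).foldl
      (fun (st : List (List Int) × List Int) idx =>
        if idx > PySem.List.pyGetD st.2 (-1) 0 + 1 then (st.1 ++ [st.2], [idx])
        else (st.1, st.2 ++ [idx]))
      (([] : List (List Int)), [PySem.List.pyGetD sorted_indices 0 0])
    let groups := st.1 ++ [st.2]
    let group_texts := groups.foldl
      (fun acc g =>
        let text := PySem.Chars.strip
          (PySem.Chars.join ['\n'] (g.map (fun j => PySem.List.pyGetD lines j [])))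
        if text ≠ [] then acc ++ [text] else acc)
      ([] : List (List Char))
    let header := pvHeader query.toList (group_texts.length : Int) (content.toList.length : Int)
    pvPaginate header group_texts page_number

-- ===== PORT B =====
def filter_by_query_py_alt (content : String) (query : String) (page_number : Int) : String × Bool :=
  let query_lower := PySem.Chars.lower query.toList
  let lines := PySem.Chars.splitOn content.toList ['\n']
  let n := PySem.List.len lines
  let intervals : List (Int × Int) :=
    (PySem.List.enumerate lines).foldl
      (fun (ivs : List (Int × Int)) (p : Int × List Char) =>
        if PySem.Chars.isIn query_lower (PySem.Chars.lower p.2) then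
          let lo : Int := if p.1 - 1 < 0 then 0 else p.1 - 1
          let hi : Int := if p.1 + 2 > n then n else p.1 + 2
          match ivs.getLast? with
          | some last =>
            if lo ≤ last.2 then ivs.dropLast ++ [(last.1, hi)] else ivs ++ [(lo, hi)]
          | none => [(lo, hi)]
        else ivs)
      []
  if intervals = [] then ("", false)
  else
    let group_texts := intervals.foldl
      (fun acc iv =>
        let text := PySem.Chars.strip
          (PySem.Chars.join ['\n'] (PySem.List.slice lines (some iv.1) (some iv.2)))
        if text ≠ [] then acc ++ [text] else acc)
      ([] : List (List Char))
    let header := pvHeader query.toList (group_texts.length : Int) (content.toList.length : Int)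
    pvPaginate header group_texts page_number

-- ===== PRECONDITION & SPEC =====
def Spec_filter_by_query_py (content : String) (query : String) (page_number : Int) (out : String × Bool) : Prop := out = filter_by_query_py_alt content query page_number
instance (content : String) (query : String) (page_number : Int) (out : String × Bool) : Decidable (Spec_filter_by_query_py content query page_number out) := by unfold Spec_filter_by_query_py; infer_instance

-- ===== CLAIM (what is proved, stated in full; the proofs are below) =====
def Claim_equal_filter_by_query_py : Prop := ∀ (content : String) (query : String) (page_number : Int), Dom_filter_by_query_py content query page_number → Spec_filter_by_query_py content query page_number (filter_by_query_py content query page_number)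

-- ===== LEMMAS AND PROOFS =====

-- interval list viewed as the list of its indices
def pvRange (iv : Int × Int) : List Int := PySem.List.pyRange iv.1 iv.2

-- the invariant of B's interval list: disjoint, separated, nonempty, within [0, n)
-- (first argument n = number of lines, second = strict lower bound on the next lo)
def pvMerged (n : Int) : Int → List (Int × Int) → Prop
  | _, [] => True
  | b, iv :: rest => b < iv.1 ∧ iv.1 < iv.2 ∧ iv.2 ≤ n ∧ pvMerged n iv.2 rest

-- bound on the last interval after the first k lines have been scanned
def pvLastB (n k : Int) (I : List (Int × Int)) : Prop :=
  ∀ iv ∈ I.getLast?, iv.1 ≤ max 0 (k - 1) ∧ iv.2 ≤ min n (k + 1)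

lemma pvMerged_mem_flat {n b : Int} {I : List (Int × Int)} (h : pvMerged n b I) :
    ∀ x ∈ (I.map pvRange).flatten, b < x := by
  induction I generalizing b with
  | nil => simp
  | cons iv rest ih =>
    obtain ⟨h1, h2, h3, h4⟩ := h
    intro x hx
    simp only [List.map_cons, List.flatten_cons, List.mem_append] at hx
    rcases hx with hx | hx
    · have := PySem.List.mem_pyRange_one.mp hx
      omega
    · have := ih h4 x hx
      omega

lemma pvMerged_last_gt {n b : Int} {I : List (Int × Int)} {iv : Int × Int}
    (h : pvMerged n b I) (hl : I.getLast? = some iv) : b < iv.2 := by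
  induction I generalizing b with
  | nil => simp at hl
  | cons iv' rest ih =>
    obtain ⟨h1, h2, h3, h4⟩ := h
    cases rest with
    | nil => simp at hl; subst hl; omega
    | cons v t =>
      rw [List.getLast?_cons_cons] at hl
      have := ih h4 hl
      omega

lemma pvMerged_last_lt {n b : Int} {I : List (Int × Int)} {iv : Int × Int}
    (h : pvMerged n b I) (hl : I.getLast? = some iv) :
    ∀ x ∈ (I.map pvRange).flatten, x < iv.2 := by
  induction I generalizing b with
  | nil => simp
  | cons iv' rest ih =>
    obtain ⟨h1, h2, h3, h4⟩ := h
    intro x hx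
    simp only [List.map_cons, List.flatten_cons, List.mem_append] at hx
    cases rest with
    | nil =>
      simp at hl
      subst hl
      rcases hx with hx | hx
      · exact (PySem.List.mem_pyRange_one.mp hx).2
      · simp at hx
    | cons v t =>
      rw [List.getLast?_cons_cons] at hl
      rcases hx with hx | hx
      · have hx2 := (PySem.List.mem_pyRange_one.mp hx).2
        have := pvMerged_last_gt h4 hl
        omega
      · exact ih h4 hl x hx

lemma pvMerged_bounds {n b : Int} {I : List (Int × Int)} (h : pvMerged n b I) :
    ∀ iv ∈ I, b < iv.1 ∧ iv.1 < iv.2 ∧ iv.2 ≤ n := by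
  induction I generalizing b with
  | nil => simp
  | cons iv' rest ih =>
    obtain ⟨h1, h2, h3, h4⟩ := h
    intro iv hiv
    rcases List.mem_cons.mp hiv with rfl | hiv
    · exact ⟨h1, h2, h3⟩
    · have := ih h4 iv hiv
      omega

lemma pvMerged_pairwise {n b : Int} {I : List (Int × Int)} (h : pvMerged n b I) :
    List.Pairwise (· < ·) ((I.map pvRange).flatten) := by
  induction I generalizing b with
  | nil => simp
  | cons iv rest ih =>
    obtain ⟨h1, h2, h3, h4⟩ := h
    simp only [List.map_cons, List.flatten_cons]
    rw [List.pairwise_append]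
    refine ⟨PySem.List.pairwise_lt_pyRange_one _ _, ih h4, ?_⟩
    intro x hx y hy
    have hx2 := (PySem.List.mem_pyRange_one.mp hx).2
    have := pvMerged_mem_flat h4 y hy
    omega


lemma pvUpdate_subset (s : PySem.Set Int) (ys : List Int) (h : ∀ x ∈ ys, x ∈ s) :
    PySem.Set.update s ys = s := by
  induction ys with
  | nil => rfl
  | cons y t ih =>
    rw [PySem.Set.update_eq_foldl] at *
    simp only [List.foldl_cons]
    have : PySem.Set.add s y = s := by
      simp [PySem.Set.add, h y (by simp)]
    rw [this]
    exact ih (fun x hx => h x (by simp [hx]))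

lemma pvUpdate_disjoint (s : PySem.Set Int) (ys : List Int) (h : ∀ x ∈ ys, x ∉ s)
    (hnd : ys.Nodup) : PySem.Set.update s ys = s ++ ys := by
  induction ys generalizing s with
  | nil => simp [PySem.Set.update]
  | cons y t ih =>
    rw [PySem.Set.update_eq_foldl] at *
    simp only [List.foldl_cons]
    have hadd : PySem.Set.add s y = s ++ [y] := by
      simp [PySem.Set.add, h y (by simp)]
    rw [hadd, ← PySem.Set.update_eq_foldl]
    rw [ih (s ++ [y]) ?_ hnd.of_cons]
    · simp
    · intro x hx
      simp only [List.mem_append, List.mem_singleton]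
      rintro (hs | rfl)
      · exact h x (by simp [hx]) hs
      · exact (List.nodup_cons.mp hnd).1 hx

lemma pvNodup_pyRange (a b : Int) : (PySem.List.pyRange a b).Nodup :=
  (PySem.List.pairwise_lt_pyRange_one a b).imp ne_of_lt

lemma pvUpdate_append (s : PySem.Set Int) (ys zs : List Int) :
    PySem.Set.update s (ys ++ zs) = PySem.Set.update (PySem.Set.update s ys) zs := by
  simp [PySem.Set.update_eq_foldl, List.foldl_append]

lemma pvGetD_cons_zero (x : Int) (t : List Int) (d : Int) :
    PySem.List.pyGetD (x :: t) 0 d = x := by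
  simp [PySem.List.pyGetD, PySem.List.pyGet?, PySem.List.pyIdx?]

lemma pvGetD_last (ys : List Int) (c d : Int) :
    PySem.List.pyGetD (ys ++ [c]) (-1) d = c := by
  simp [PySem.List.pyGetD, PySem.List.pyGet?, PySem.List.pyIdx?]

lemma pvSlice_take_drop {α : Type} (xs : List α) (a b : Int) (h0 : 0 ≤ a) (hab : a ≤ b)
    (hb : b ≤ xs.length) :
    PySem.List.slice xs (some a) (some b) = (xs.take b.toNat).drop a.toNat := by
  simp only [PySem.List.slice]
  unfold PySem.List.clampIdx
  rw [if_neg (by omega), if_neg (by omega), min_eq_left (by omega), min_eq_left (by omega)]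
  rw [List.drop_take]

lemma pvMap_getD_range {α : Type} (xs : List α) (d : α) (m : Nat) :
    ∀ (lo hi : Int), (hi - lo).toNat = m → 0 ≤ lo → hi ≤ xs.length →
    (PySem.List.pyRange lo hi).map (fun j => PySem.List.pyGetD xs j d)
      = (xs.take hi.toNat).drop lo.toNat := by
  induction m with
  | zero =>
    intro lo hi hm h0 hb
    rw [PySem.List.pyRange_one_eq_nil (by omega)]
    simp only [List.map_nil]
    rw [eq_comm, List.drop_eq_nil_iff]
    simp
    omega
  | succ m ih =>
    intro lo hi hm h0 hb
    have hlt : lo < hi := by omega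
    have hlen : lo.toNat < xs.length := by omega
    rw [PySem.List.pyRange_one_cons hlt, List.map_cons]
    have hget : PySem.List.pyGetD xs lo d = xs[lo.toNat] := by
      simp only [PySem.List.pyGetD, PySem.List.pyGet?, PySem.List.pyIdx?, h0, if_pos (by omega : lo < (xs.length : Int))]
      simp [List.getElem?_eq_getElem hlen]
    have htk : lo.toNat < (xs.take hi.toNat).length := by
      simp
      omega
    rw [hget, List.drop_eq_getElem_cons htk, List.getElem_take]
    rw [ih (lo + 1) hi (by omega) (by omega) hb]
    congr 2
    omega


-- the two scan loop bodies (exactly the lambdas of the two ports, with q = query.lower()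
-- and n = len(lines) abstracted)
def pvStepA (q : List Char) (n : Int) : PySem.Set Int → Int × List Char → PySem.Set Int :=
  fun s p =>
    if PySem.Chars.isIn q (PySem.Chars.lower p.2) then
      PySem.Set.update s (PySem.List.pyRange (max 0 (p.1 - 1)) (min n (p.1 + 2)))
    else s

def pvStepB (q : List Char) (n : Int) : List (Int × Int) → Int × List Char → List (Int × Int) :=
  fun ivs p =>
    if PySem.Chars.isIn q (PySem.Chars.lower p.2) then
      let lo : Int := if p.1 - 1 < 0 then 0 else p.1 - 1
      let hi : Int := if p.1 + 2 > n then n else p.1 + 2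
      match ivs.getLast? with
      | some last =>
        if lo ≤ last.2 then ivs.dropLast ++ [(last.1, hi)] else ivs ++ [(lo, hi)]
      | none => [(lo, hi)]
    else ivs

lemma pvLastB_mono {n k k' : Int} {I : List (Int × Int)} (h : pvLastB n k I) (hk : k ≤ k') :
    pvLastB n k' I := by
  intro iv hiv
  have := h iv hiv
  omega

lemma pvMerged_append_ext {n : Int} {I₀ : List (Int × Int)} {last : Int × Int} {hi' : Int} :
    ∀ {b : Int}, pvMerged n b (I₀ ++ [last]) → last.2 ≤ hi' → hi' ≤ n →
    pvMerged n b (I₀ ++ [(last.1, hi')]) := by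
  induction I₀ with
  | nil =>
    intro b h h1 h2
    obtain ⟨ha, hb, hc, -⟩ := h
    exact ⟨ha, by omega, h2, trivial⟩
  | cons iv t ih =>
    intro b h h1 h2
    obtain ⟨ha, hb, hc, hd⟩ := h
    exact ⟨ha, hb, hc, ih hd h1 h2⟩

lemma pvMerged_append_new {n lo hi : Int} {I : List (Int × Int)} {last : Int × Int} :
    ∀ {b : Int}, pvMerged n b I → I.getLast? = some last → last.2 < lo → lo < hi → hi ≤ n →
    pvMerged n b (I ++ [(lo, hi)]) := by
  induction I with
  | nil => intro b _ hl; simp at hl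
  | cons iv t ih =>
    intro b h hl h1 h2 h3
    obtain ⟨ha, hb, hc, hd⟩ := h
    cases t with
    | nil =>
      simp at hl
      subst hl
      exact ⟨ha, hb, hc, by omega, h2, h3, trivial⟩
    | cons v u =>
      rw [List.getLast?_cons_cons] at hl
      exact ⟨ha, hb, hc, ih hd hl h1 h2 h3⟩

-- the grouping loop body of port A
def pvStepG : List (List Int) × List Int → Int → List (List Int) × List Int :=
  fun st idx =>
    if idx > PySem.List.pyGetD st.2 (-1) 0 + 1 then (st.1 ++ [st.2], [idx])
    else (st.1, st.2 ++ [idx])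

-- feeding a contiguous run whose first element continues the current group
lemma pvFeedRun (m : Nat) : ∀ (gs : List (List Int)) (ys : List Int) (a b : Int),
    (b - a).toNat = m →
    (PySem.List.pyRange a b).foldl pvStepG (gs, ys ++ [a - 1])
      = (gs, (ys ++ [a - 1]) ++ PySem.List.pyRange a b) := by
  induction m with
  | zero =>
    intro gs ys a b hm
    rw [PySem.List.pyRange_one_eq_nil (by omega)]
    simp
  | succ m ih =>
    intro gs ys a b hm
    have hlt : a < b := by omega
    rw [PySem.List.pyRange_one_cons hlt, List.foldl_cons]
    have hstep : pvStepG (gs, ys ++ [a - 1]) a = (gs, (ys ++ [a - 1]) ++ [a]) := by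
      simp only [pvStepG, pvGetD_last]
      rw [if_neg (by omega)]
    rw [hstep]
    have := ih gs (ys ++ [a - 1]) (a + 1) b (by omega)
    rw [show a + 1 - 1 = a from by ring] at this
    rw [this]
    simp

-- consuming the flattened remaining intervals groups them back into pvRange blocks
lemma pvGroupAll (n : Int) : ∀ (I : List (Int × Int)) (b : Int) (gs : List (List Int))
    (ys : List Int) (c : Int), pvMerged n b I → c + 1 ≤ b →
    (((I.map pvRange).flatten).foldl pvStepG (gs, ys ++ [c])).1
        ++ [(((I.map pvRange).flatten).foldl pvStepG (gs, ys ++ [c])).2]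
      = gs ++ ((ys ++ [c]) :: I.map pvRange) := by
  intro I
  induction I with
  | nil => intro b gs ys c _ _; simp
  | cons iv rest ih =>
    intro b gs ys c hM hc
    obtain ⟨h1, h2, h3, h4⟩ := hM
    simp only [List.map_cons, List.flatten_cons]
    rw [List.foldl_append]
    have hcons : pvRange iv = iv.1 :: PySem.List.pyRange (iv.1 + 1) iv.2 := by
      simp only [pvRange]
      exact PySem.List.pyRange_one_cons h2
    rw [hcons, List.foldl_cons]
    have hstep : pvStepG (gs, ys ++ [c]) iv.1 = (gs ++ [ys ++ [c]], [iv.1]) := by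
      simp only [pvStepG, pvGetD_last]
      rw [if_pos (by omega)]
    rw [hstep]
    have hfeed := pvFeedRun (iv.2 - (iv.1 + 1)).toNat (gs ++ [ys ++ [c]]) []
      (iv.1 + 1) iv.2 rfl
    rw [show iv.1 + 1 - 1 = iv.1 from by ring] at hfeed
    simp only [List.nil_append] at hfeed
    rw [hfeed]
    have hsplit : ([iv.1] : List Int) ++ PySem.List.pyRange (iv.1 + 1) iv.2
        = PySem.List.pyRange iv.1 (iv.2 - 1) ++ [iv.2 - 1] := by
      have hrr := PySem.List.pyRange_one_succ_right (a := iv.1) (b := iv.2 - 1) (by omega)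
      rw [show iv.2 - 1 + 1 = iv.2 from by ring] at hrr
      rw [List.singleton_append, ← PySem.List.pyRange_one_cons h2, hrr]
    rw [hsplit]
    rw [ih iv.2 (gs ++ [ys ++ [c]]) (PySem.List.pyRange iv.1 (iv.2 - 1)) (iv.2 - 1) h4
      (by omega)]
    rw [← hsplit]
    simp

-- the combined scan invariant: A's index set is always the flattening of B's interval list
lemma pvScan (q : List Char) (n : Int) (xs : List (List Char)) :
    ∀ (k : Int) (S : PySem.Set Int) (I : List (Int × Int)),
    S = (I.map pvRange).flatten → pvMerged n (-1) I → pvLastB n k I →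
    0 ≤ k → k + xs.length ≤ n →
    (PySem.List.enumerate xs k).foldl (pvStepA q n) S
        = ((((PySem.List.enumerate xs k).foldl (pvStepB q n) I)).map pvRange).flatten
    ∧ pvMerged n (-1) ((PySem.List.enumerate xs k).foldl (pvStepB q n) I)
    ∧ pvLastB n (k + xs.length) ((PySem.List.enumerate xs k).foldl (pvStepB q n) I) := by
  induction xs with
  | nil =>
    intro k S I hS hM hL hk hn
    simpa [PySem.List.enumerate] using ⟨hS, hM, hL⟩
  | cons line rest ih =>
    intro k S I hS hM hL hk hn
    have hkn : k < n := by
      simp only [List.length_cons] at hn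
      push_cast at hn
      omega
    have hcast : k + ((line :: rest).length : Int) = (k + 1) + (rest.length : Int) := by
      simp only [List.length_cons]
      push_cast
      ring
    rw [PySem.List.enumerate_cons, List.foldl_cons, List.foldl_cons, hcast]
    by_cases hq : PySem.Chars.isIn q (PySem.Chars.lower line) = true
    · -- this line matches: the window [lo, hi) is added
      set lo : Int := max 0 (k - 1) with hlo
      set hi : Int := min n (k + 2) with hhi
      have hA : pvStepA q n S (k, line) =
          PySem.Set.update S (PySem.List.pyRange lo hi) := by
        simp only [pvStepA, hq, if_true]
        rw [← hlo, ← hhi]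
      have hloB : (if k - 1 < 0 then (0 : Int) else k - 1) = lo := by
        split_ifs <;> omega
      have hhiB : (if k + 2 > n then n else k + 2) = hi := by
        split_ifs <;> omega
      cases hI : I.getLast? with
      | none =>
        have hInil : I = [] := List.getLast?_eq_none_iff.mp hI
        subst hInil
        have hSnil : S = [] := by simpa using hS
        subst hSnil
        have hB : pvStepB q n [] (k, line) = [(lo, hi)] := by
          simp only [pvStepB, hq, if_true, List.getLast?_nil]
          rw [hloB, hhiB]
        have hAval : pvStepA q n [] (k, line) = PySem.List.pyRange lo hi := by
          rw [hA, pvUpdate_disjoint _ _ (by simp) (pvNodup_pyRange lo hi)]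
          simp
        rw [hAval, hB]
        exact ih (k + 1) _ _ (by simp [pvRange]) ⟨by omega, by omega, by omega, trivial⟩
          (by intro iv hiv; simp at hiv; subst hiv; constructor <;> [omega; omega])
          (by omega) (by simp only [List.length_cons] at hn; push_cast at hn ⊢; omega)
      | some last =>
        obtain ⟨I₀, rfl⟩ := List.getLast?_eq_some_iff.mp hI
        have hlast := hL last (by simp)
        have hbnds := pvMerged_bounds hM last (by simp)
        have hconcat : (I₀ ++ [last]).getLast? = some last := List.getLast?_concat
        by_cases hmerge : lo ≤ last.2
        · -- overlapping/adjacent window: extend the last interval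
          have hB : pvStepB q n (I₀ ++ [last]) (k, line) = I₀ ++ [(last.1, hi)] := by
            simp only [pvStepB, hq, if_true, hconcat]
            rw [hloB, hhiB, if_pos hmerge]
            simp
          have h25 : last.2 ≤ hi := by omega
          have hsub : ∀ x ∈ PySem.List.pyRange lo last.2, x ∈ S := by
            intro x hx
            have hx' := PySem.List.mem_pyRange_one.mp hx
            rw [hS]
            apply List.mem_flatten.mpr
            refine ⟨pvRange last, by simp, ?_⟩
            exact PySem.List.mem_pyRange_one.mpr ⟨by omega, by omega⟩
          have hdisj : ∀ x ∈ PySem.List.pyRange last.2 hi, x ∉ S := by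
            intro x hx hxS
            have hx' := PySem.List.mem_pyRange_one.mp hx
            have := pvMerged_last_lt hM hconcat x (hS ▸ hxS)
            omega
          have hAval : pvStepA q n S (k, line) = S ++ PySem.List.pyRange last.2 hi := by
            rw [hA, PySem.List.pyRange_one_append lo last.2 hi hmerge h25, pvUpdate_append,
              pvUpdate_subset _ _ hsub,
              pvUpdate_disjoint _ _ hdisj (pvNodup_pyRange _ _)]
          have hS' : S ++ PySem.List.pyRange last.2 hi
              = ((I₀ ++ [(last.1, hi)]).map pvRange).flatten := by
            rw [hS]
            simp only [List.map_append, List.flatten_append, List.map_cons, List.map_nil,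
              List.flatten_cons, List.flatten_nil, List.append_nil]
            rw [show pvRange (last.1, hi) = PySem.List.pyRange last.1 hi from rfl,
              PySem.List.pyRange_one_append last.1 last.2 hi (by omega) h25]
            simp [pvRange]
          rw [hAval, hB]
          exact ih (k + 1) _ _ hS' (pvMerged_append_ext hM h25 (by omega))
            (by intro iv hiv; rw [List.getLast?_concat] at hiv; simp at hiv; subst hiv
                constructor <;> [omega; omega])
            (by omega) (by simp only [List.length_cons] at hn; push_cast at hn ⊢; omega)
        · -- detached window: start a new interval
          have hB : pvStepB q n (I₀ ++ [last]) (k, line) = (I₀ ++ [last]) ++ [(lo, hi)] := by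
            simp only [pvStepB, hq, if_true, hconcat]
            rw [hloB, hhiB, if_neg hmerge]
          have hdisj : ∀ x ∈ PySem.List.pyRange lo hi, x ∉ S := by
            intro x hx hxS
            have hx' := PySem.List.mem_pyRange_one.mp hx
            have := pvMerged_last_lt hM hconcat x (hS ▸ hxS)
            omega
          have hAval : pvStepA q n S (k, line) = S ++ PySem.List.pyRange lo hi := by
            rw [hA, pvUpdate_disjoint _ _ hdisj (pvNodup_pyRange _ _)]
          have hS' : S ++ PySem.List.pyRange lo hi
              = (((I₀ ++ [last]) ++ [(lo, hi)]).map pvRange).flatten := by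
            rw [hS]
            simp [pvRange]
          rw [hAval, hB]
          exact ih (k + 1) _ _ hS'
            (pvMerged_append_new hM hconcat (by omega) (by omega) (by omega))
            (by intro iv hiv; rw [List.getLast?_concat] at hiv; simp at hiv; subst hiv
                constructor <;> [omega; omega])
            (by omega) (by simp only [List.length_cons] at hn; push_cast at hn ⊢; omega)
    · -- no match: both states unchanged
      have hA : pvStepA q n S (k, line) = S := by
        simp only [pvStepA, hq]
        simp
      have hB : pvStepB q n I (k, line) = I := by
        simp only [pvStepB, hq]
        simp
      rw [hA, hB]
      exact ih (k + 1) S I hS hM (pvLastB_mono hL (by omega)) (by omega)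
        (by simp only [List.length_cons] at hn; push_cast at hn ⊢; omega)


lemma pvRange_snoc {a b : Int} (h : a < b) :
    PySem.List.pyRange a b = PySem.List.pyRange a (b - 1) ++ [b - 1] := by
  have hrr := PySem.List.pyRange_one_succ_right (a := a) (b := b - 1) (by omega)
  rw [show b - 1 + 1 = b from by ring] at hrr
  exact hrr

-- the two ports re-expressed as compositions of named pieces (definitionally equal)
def pvLines (content : String) : List (List Char) := PySem.Chars.splitOn content.toList ['\n']

def pvQL (query : String) : List Char := PySem.Chars.lower query.toList

def pvSA (content query : String) : List Int :=
  (PySem.List.enumerate (pvLines content)).foldl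
    (pvStepA (pvQL query) (PySem.List.len (pvLines content))) ([] : PySem.Set Int)

def pvIB (content query : String) : List (Int × Int) :=
  (PySem.List.enumerate (pvLines content)).foldl
    (pvStepB (pvQL query) (PySem.List.len (pvLines content))) ([] : List (Int × Int))

def pvSt (content query : String) : List (List Int) × List Int :=
  (PySem.List.slice (PySem.List.sorted (pvSA content query) (fun x => x)) (some 1)).foldl
    pvStepG (([] : List (List Int)), [PySem.List.pyGetD
      (PySem.List.sorted (pvSA content query) (fun x => x)) 0 0])

def pvTextsA (content query : String) : List (List Char) :=
  ((pvSt content query).1 ++ [(pvSt content query).2]).foldl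
    (fun acc g =>
      let text := PySem.Chars.strip
        (PySem.Chars.join ['\n'] (g.map (fun j => PySem.List.pyGetD (pvLines content) j [])))
      if text ≠ [] then acc ++ [text] else acc)
    ([] : List (List Char))

def pvTextsB (content query : String) : List (List Char) :=
  (pvIB content query).foldl
    (fun acc iv =>
      let text := PySem.Chars.strip
        (PySem.Chars.join ['\n'] (PySem.List.slice (pvLines content) (some iv.1) (some iv.2)))
      if text ≠ [] then acc ++ [text] else acc)
    ([] : List (List Char))

def pvA' (content query : String) (pn : Int) : String × Bool :=
  if pvSA content query = [] then ("", false)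
  else
    pvPaginate (pvHeader query.toList ((pvTextsA content query).length : Int)
      (content.toList.length : Int)) (pvTextsA content query) pn

def pvB' (content query : String) (pn : Int) : String × Bool :=
  if pvIB content query = [] then ("", false)
  else
    pvPaginate (pvHeader query.toList ((pvTextsB content query).length : Int)
      (content.toList.length : Int)) (pvTextsB content query) pn

lemma pvScan_inst (content query : String) :
    pvSA content query = ((pvIB content query).map pvRange).flatten
    ∧ pvMerged (PySem.List.len (pvLines content)) (-1) (pvIB content query) := by
  unfold pvSA pvIB
  have hnlen : PySem.List.len (pvLines content) = ((pvLines content).length : Int) := by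
    simp [PySem.List.len]
  obtain ⟨h1, h2, -⟩ := pvScan (pvQL query) (PySem.List.len (pvLines content))
    (pvLines content) 0 ([] : PySem.Set Int) ([] : List (Int × Int))
    (by simp) trivial (by intro iv hiv; simp at hiv) (by omega) (by rw [hnlen]; omega)
  exact ⟨h1, h2⟩

-- A's sort + consecutive-run regrouping recovers exactly B's interval blocks
lemma pvGroupSorted {n : Int} (iv : Int × Int) (rest : List (Int × Int)) (S : List Int)
    (hM : pvMerged n (-1) (iv :: rest)) (hSI : S = ((iv :: rest).map pvRange).flatten) :
    ((PySem.List.slice (PySem.List.sorted S (fun x => x)) (some 1)).foldl pvStepG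
        (([] : List (List Int)), [PySem.List.pyGetD (PySem.List.sorted S (fun x => x)) 0 0])).1
      ++ [((PySem.List.slice (PySem.List.sorted S (fun x => x)) (some 1)).foldl pvStepG
        (([] : List (List Int)), [PySem.List.pyGetD (PySem.List.sorted S (fun x => x)) 0 0])).2]
      = (iv :: rest).map pvRange := by
  obtain ⟨h1, h2, h3, h4⟩ := id hM
  have hsorted : PySem.List.sorted S (fun x => x) = S :=
    PySem.List.sorted_eq_of_perm_of_pairwise_lt S S _ (List.Perm.refl S)
      (hSI ▸ pvMerged_pairwise hM)
  have hScons : S = iv.1 :: (PySem.List.pyRange (iv.1 + 1) iv.2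
      ++ ((rest.map pvRange).flatten)) := by
    rw [hSI]
    simp only [List.map_cons, List.flatten_cons]
    rw [show pvRange iv = PySem.List.pyRange iv.1 iv.2 from rfl,
      PySem.List.pyRange_one_cons h2]
    simp
  have hslice : PySem.List.slice S (some 1) = PySem.List.pyRange (iv.1 + 1) iv.2
      ++ ((rest.map pvRange).flatten) := by
    rw [PySem.List.slice_from S (by omega : (0 : Int) ≤ 1), hScons]
    simp
  have hget0 : PySem.List.pyGetD S 0 0 = iv.1 := by
    rw [hScons, pvGetD_cons_zero]
  rw [hsorted, hslice, hget0, List.foldl_append]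
  have hfeed := pvFeedRun (iv.2 - (iv.1 + 1)).toNat ([] : List (List Int)) []
    (iv.1 + 1) iv.2 rfl
  rw [show iv.1 + 1 - 1 = iv.1 from by ring] at hfeed
  simp only [List.nil_append] at hfeed
  rw [hfeed]
  have hsnoc : ([iv.1] : List Int) ++ PySem.List.pyRange (iv.1 + 1) iv.2
      = PySem.List.pyRange iv.1 (iv.2 - 1) ++ [iv.2 - 1] := by
    rw [List.singleton_append, ← PySem.List.pyRange_one_cons h2, pvRange_snoc h2]
  rw [hsnoc]
  rw [pvGroupAll n rest iv.2 ([] : List (List Int)) (PySem.List.pyRange iv.1 (iv.2 - 1))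
    (iv.2 - 1) h4 (by omega)]
  rw [← hsnoc, List.singleton_append, ← PySem.List.pyRange_one_cons h2]
  simp [pvRange]

lemma pvTexts_eq (content query : String) (iv : Int × Int) (rest : List (Int × Int))
    (hIc : pvIB content query = iv :: rest) :
    pvTextsA content query = pvTextsB content query := by
  obtain ⟨hSI, hM⟩ := pvScan_inst content query
  rw [hIc] at hSI hM
  unfold pvTextsA pvTextsB
  rw [hIc]
  have hgroups : (pvSt content query).1 ++ [(pvSt content query).2]
      = (iv :: rest).map pvRange := by
    unfold pvSt
    exact pvGroupSorted iv rest (pvSA content query) hM hSI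
  rw [hgroups, List.foldl_map]
  apply PySem.List.foldl_congr_mem
  intro acc iv' hiv'
  have hb := pvMerged_bounds hM iv' hiv'
  have hnlen : PySem.List.len (pvLines content) = ((pvLines content).length : Int) := by
    simp [PySem.List.len]
  have heq : (pvRange iv').map (fun j => PySem.List.pyGetD (pvLines content) j [])
      = PySem.List.slice (pvLines content) (some iv'.1) (some iv'.2) := by
    rw [show pvRange iv' = PySem.List.pyRange iv'.1 iv'.2 from rfl]
    rw [pvMap_getD_range (pvLines content) [] (iv'.2 - iv'.1).toNat iv'.1 iv'.2 rfl
      (by omega) (by omega),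
      pvSlice_take_drop (pvLines content) iv'.1 iv'.2 (by omega) (by omega) (by omega)]
  rw [heq]

lemma pvAB (content query : String) (pn : Int) :
    pvA' content query pn = pvB' content query pn := by
  obtain ⟨hSI, hM⟩ := pvScan_inst content query
  unfold pvA' pvB'
  cases hIc : pvIB content query with
  | nil =>
    rw [hIc] at hSI
    simp only [List.map_nil, List.flatten_nil] at hSI
    rw [hSI]
    simp
  | cons iv rest =>
    rw [hIc] at hSI hM
    obtain ⟨h1, h2, -, -⟩ := hM
    have hSne : pvSA content query ≠ [] := by
      rw [hSI]
      simp only [List.map_cons, List.flatten_cons]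
      rw [show pvRange iv = PySem.List.pyRange iv.1 iv.2 from rfl,
        PySem.List.pyRange_one_cons h2]
      simp
    rw [if_neg hSne, if_neg (by simp), pvTexts_eq content query iv rest hIc]

-- ===== VERDICT (by name: the statement is the Claim_ definition above) =====
theorem filter_by_query_py_spec : Claim_equal_filter_by_query_py := by
  intro content query pn _
  show filter_by_query_py content query pn = filter_by_query_py_alt content query pn
  have hA : filter_by_query_py content query pn = pvA' content query pn := rfl
  have hB : filter_by_query_py_alt content query pn = pvB' content query pn := rfl
  rw [hA, hB, pvAB]
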